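-- pv_equiv track=rewrite | github.com/LoanpyDataHub/loanpy | loanpy/scapplier.py | get_mtx
-- ===== SOURCE A (Python) =====
-- from typing import Dict, Iterable, List, Tuple, Union
--
-- def get_mtx(target: Iterable, source: Iterable) -> List[List[int]]:
--     """
--     Called by loanpy.scapplier.Adrc.repair_phonotactics. Similar to
--     loanpy.scapplier.edit_distance_with2ops but without
--     weights (i.e. deletion and insertion
--     both always cost one) and the matrix is returned.
--     Draws a matrix of minimum edit distances between every substring of two
--     input strings.
--
--     :param target: The target word
--     :type target: iterable, e.g. str or list
--
--     :param source: The source word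
--     :type source: iterable, e.g. str or list
--
--     :returns: A matrix where every cell tells the cost of turning one
--               substring to the other (only delete and insert with cost 1 for
--               both)
--     :rtype: list of lists
--
--     .. code-block:: python
--
--         >>> from loanpy.scapplier import get_mtx
--         >>> get_mtx("Bécs", "Pécs")
--         [[0, 1, 2, 3, 4],
--          [1, 2, 3, 4, 5],
--          [2, 3, 2, 3, 4],
--          [3, 4, 3, 2, 3],
--          [4, 5, 4, 3, 2]]
--         # What happens under the hood:
--         # deletion costs 1, insertion costs 1, so the distances are:
--         # B C D E  # hashtag stands for empty string
--         # 0 1 2 3 4  # distance B-#=1, BC-#=2, BCD-#=3, BCDE-#=4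
--         # D 1 2 3 2 3  # distance D-#=1, D-B=2, D-BC=3, D-BCD=2, D-BCDE=3
--         # E 2 3 4 3 2  # distance DE-#=2, DE-B=3, DE-BC=4, DE-BCD=3, DE-BCDE=2
--         # the min. edit distance from BCDE-DE=2: delete B, delete C
--
--     .. seealso::
--         `YouTube tutorial by Rylan Fowers
--         <https://www.youtube.com/watch?v=AY2DZ4a9gyk>`_
--     """
--
--     # build matrix of correct size
--     target = ['#'] + [k for k in target]  # add hashtag as starting value
--     source = ['#'] + [k for k in source]  # starting value is always zero
--
--     # matrix consists of zeros at first. sol stands for solution.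
--     sol = [[0 for _ in range(len(target))] for _ in range(len(source))]
--
--     # first row of matrix is 1,2,3,4,5,... as long as the target word is
--     sol[0] = [j for j in range(len(target))]
--
--     # first column is also 1,2,3,4,5....  as long as the source word is
--     for j in range(len(source)):
--         sol[j][0] = j
--
--     # Add anchor value
--     if target[1] != source[1]:  # if first letters of the 2 words r different
--         sol[1][1] = 2  # set the first value (upper left corner) to 2
--     # else it just stays zero
--
--     # loop through the indexes of the two words with a nested loop
--     for c in range(1, len(target)):
--         for r in range(1, len(source)):
--             if target[c] != source[r]:  # when the two letters are different
--                 # pick minimum of the 2 boxes to the left and above and add 1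
--                 sol[r][c] = min(sol[r - 1][c], sol[r][c - 1]) + 1
--             else:  # but if the letters are different
--                 # pick the letter diagonally up left
--                 sol[r][c] = sol[r - 1][c - 1]
--
--     # returns the entire matrix. min edit distance in bottom right corner jff.
--     return sol
-- ===== SOURCE B (Python) =====
-- def get_mtx(target, source):
--     # LCS decomposition: build the longest-common-subsequence length table L,
--     # then every indel-distance cell is r + c - 2*L[r][c].
--     t, s = list(target), list(source)
--     L = [[0] * (len(t) + 1)]
--     for sc in s:
--         prev = L[-1]
--         row = [0]
--         for tc, p0, p1 in zip(t, prev, prev[1:]):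
--             row.append(p0 + 1 if sc == tc else max(p1, row[-1]))
--         L.append(row)
--     return [[r + c - 2 * x for c, x in enumerate(Lr)] for r, Lr in enumerate(L)]
-- ===== Notes on version B (the rewrite author's own statement) =====
-- stated objective: alternative
-- what changed: B builds a longest-common-subsequence length table (a maximization DP with first row/column implicit zeros) and then derives every cell as r + c - 2*L[r][c], instead of A's direct cell-by-cell minimization of insert/delete costs with special-cased first row, first column and anchor cell.
import Mathlib
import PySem

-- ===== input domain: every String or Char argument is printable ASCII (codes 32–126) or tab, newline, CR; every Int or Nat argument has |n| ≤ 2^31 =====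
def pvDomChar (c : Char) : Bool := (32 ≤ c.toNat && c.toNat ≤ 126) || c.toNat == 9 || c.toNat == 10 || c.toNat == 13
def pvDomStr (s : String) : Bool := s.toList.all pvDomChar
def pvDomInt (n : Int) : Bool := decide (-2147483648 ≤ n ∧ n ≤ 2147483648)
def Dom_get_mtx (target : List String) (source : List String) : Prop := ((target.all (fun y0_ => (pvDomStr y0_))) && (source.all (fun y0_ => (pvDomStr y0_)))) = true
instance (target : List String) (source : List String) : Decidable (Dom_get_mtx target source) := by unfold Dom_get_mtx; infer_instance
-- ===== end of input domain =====

-- B replaces A's direct insert/delete minimization by an LCS-length table plus the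
-- identity cell = r + c - 2*LCS; same O(n*m) cost, different decomposition.

-- ===== PORT A =====
-- sol[r][c] = v  (Python list mutation; indices are Python ints)
def pySet2 (m : List (List Int)) (r c v : Int) : List (List Int) :=
  PySem.List.pySetD m r (PySem.List.pySetD (PySem.List.pyGetD m r []) c v)

-- sol[r][c]  (read; only used where Python's index is in range)
def pyGet2 (m : List (List Int)) (r c : Int) : Int :=
  PySem.List.pyGetD (PySem.List.pyGetD m r []) c 0

def get_mtx (target : List String) (source : List String) : List (List Int) :=
  let t := "#" :: target
  let s := "#" :: source
  -- sol = [[0 for _ in range(len(target))] for _ in range(len(source))]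
  let sol := (List.range s.length).map (fun _ => (List.range t.length).map (fun _ => (0 : Int)))
  -- sol[0] = [j for j in range(len(target))]
  let sol := PySem.List.pySetD sol 0 (PySem.List.pyRange 0 (t.length : Int) 1)
  -- for j in range(len(source)): sol[j][0] = j
  let sol := (PySem.List.pyRange 0 (s.length : Int) 1).foldl (fun m j => pySet2 m j 0 j) sol
  -- anchor: if target[1] != source[1]: sol[1][1] = 2   (raises in Python when a word is empty: Pre_)
  let sol := if PySem.List.pyGetD t 1 "" ≠ PySem.List.pyGetD s 1 "" then pySet2 sol 1 1 2 else sol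
  -- nested loops
  (PySem.List.pyRange 1 (t.length : Int) 1).foldl (fun m c =>
    (PySem.List.pyRange 1 (s.length : Int) 1).foldl (fun m r =>
      if PySem.List.pyGetD t c "" ≠ PySem.List.pyGetD s r "" then
        pySet2 m r c (min (pyGet2 m (r - 1) c) (pyGet2 m r (c - 1)) + 1)
      else
        pySet2 m r c (pyGet2 m (r - 1) (c - 1))) m) sol

-- ===== PORT B =====
-- inner loop: for tc, p0, p1 in zip(t, prev, prev[1:]): row.append(p0+1 if sc == tc else max(p1, row[-1]))
def bRowAux (sc : String) : List (String × Int × Int) → Int → List Int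
  | [], _ => []
  | (tc, p0, p1) :: rest, last =>
      let v := if sc = tc then p0 + 1 else max p1 last
      v :: bRowAux sc rest v

def bRow (sc : String) (t : List String) (prev : List Int) : List Int :=
  0 :: bRowAux sc (t.zip (prev.zip prev.tail)) 0

-- outer loop: for sc in s: ... L.append(row)
def bRows (t : List String) : List String → List Int → List (List Int)
  | [], _ => []
  | sc :: ss, prev =>
      let row := bRow sc t prev
      row :: bRows t ss row

def get_mtx_alt (target : List String) (source : List String) : List (List Int) :=
  let first : List Int := List.replicate (target.length + 1) 0
  let L := first :: bRows target source first
  (PySem.List.enumerate L 0).map (fun rL =>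
    (PySem.List.enumerate rL.2 0).map (fun cx => rL.1 + cx.1 - 2 * cx.2))

-- ===== PRECONDITION & SPEC =====
-- Pre_ excludes exactly the inputs on which Python A raises IndexError (the anchor step
-- reads target[1] and source[1] of the '#'-prefixed words): an empty target or source.
def Pre_get_mtx (target : List String) (source : List String) : Prop :=
  target ≠ [] ∧ source ≠ []
instance (target : List String) (source : List String) : Decidable (Pre_get_mtx target source) := by
  unfold Pre_get_mtx; infer_instance

def pvWitness_get_mtx : List String × List String := (["a", "b"], ["a", "c"])

def Spec_get_mtx (target : List String) (source : List String) (out : List (List Int)) : Prop := out = get_mtx_alt target source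
instance (target : List String) (source : List String) (out : List (List Int)) : Decidable (Spec_get_mtx target source out) := by unfold Spec_get_mtx; infer_instance

-- ===== CLAIM (what is proved, stated in full; the proofs are below) =====
def Claim_equal_get_mtx : Prop := ∀ (target : List String) (source : List String), Dom_get_mtx target source → Pre_get_mtx target source → Spec_get_mtx target source (get_mtx target source)

-- ===== LEMMAS AND PROOFS =====

-- LCS length of the first r letters of s and the first c letters of t.
def lspec (s t : List String) : Nat → Nat → Nat
  | 0, _ => 0
  | _ + 1, 0 => 0
  | r + 1, c + 1 =>
      if s.getD r "" = t.getD c "" then lspec s t r c + 1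
      else max (lspec s t r (c + 1)) (lspec s t (r + 1) c)
termination_by r c => r + c

-- the indel distance of the prefix pair (r, c)
def fspec (s t : List String) (r c : Nat) : Int := (r : Int) + c - 2 * lspec s t r c

def mtxSpec (tL sL : List String) : List (List Int) :=
  (List.range (sL.length + 1)).map (fun r =>
    (List.range (tL.length + 1)).map (fun c => fspec sL tL r c))

-- ===== B side =====
def Lrow (sL tL : List String) (r : Nat) : List Int :=
  (List.range (tL.length + 1)).map (fun c => (lspec sL tL r c : Int))

lemma lspec_zero_left (sL tL : List String) (c : Nat) : lspec sL tL 0 c = 0 := by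
  simp [lspec]

lemma lspec_zero_right (sL tL : List String) (r : Nat) : lspec sL tL r 0 = 0 := by
  cases r <;> simp [lspec]

lemma first_eq_Lrow (sL tL : List String) :
    (List.replicate (tL.length + 1) (0 : Int)) = Lrow sL tL 0 := by
  simp [Lrow, lspec_zero_left]

lemma bRowAux_spec (sL tL : List String) (r0 : Nat) :
    ∀ (k c0 : Nat),
    bRowAux (sL.getD r0 "")
        ((List.range' c0 k).map (fun c =>
          (tL.getD c "", ((lspec sL tL r0 c : Int)), (lspec sL tL r0 (c + 1) : Int))))
        ((lspec sL tL (r0 + 1) c0 : Int))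
      = (List.range' (c0 + 1) k).map (fun c => (lspec sL tL (r0 + 1) c : Int)) := by
  intro k
  induction k with
  | zero => intro c0; simp [bRowAux]
  | succ k ih =>
    intro c0
    rw [List.range'_succ, List.range'_succ, List.map_cons, List.map_cons, bRowAux]
    have hv : (if sL.getD r0 "" = tL.getD c0 "" then ((lspec sL tL r0 c0 : Int)) + 1
        else max ((lspec sL tL r0 (c0 + 1) : Int)) ((lspec sL tL (r0 + 1) c0 : Int)))
        = ((lspec sL tL (r0 + 1) (c0 + 1) : Int)) := by
      rw [lspec]
      split_ifs with h <;> push_cast <;> ring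
    rw [hv, ih (c0 + 1)]

lemma zip_triple (sL tL : List String) (r0 : Nat) :
    tL.zip ((Lrow sL tL r0).zip (Lrow sL tL r0).tail)
      = (List.range' 0 tL.length).map (fun c =>
          (tL.getD c "", ((lspec sL tL r0 c : Int)), (lspec sL tL r0 (c + 1) : Int))) := by
  apply List.ext_getElem
  · simp [Lrow]
  · intro j h1 h2
    have hj : j < tL.length := by simpa [Lrow] using h2
    simp [Lrow, List.getElem_zip, List.getElem_tail, List.getElem_range',
      List.getD_eq_getElem?_getD, hj]

lemma bRow_eq_Lrow (sL tL : List String) (r0 : Nat) :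
    bRow (sL.getD r0 "") tL (Lrow sL tL r0) = Lrow sL tL (r0 + 1) := by
  rw [bRow, zip_triple]
  have h0 : ((lspec sL tL (r0 + 1) 0 : Int)) = 0 := by simp [lspec_zero_right]
  rw [← h0, bRowAux_spec sL tL r0 tL.length 0]
  rw [Lrow, List.range_eq_range', List.range'_succ, List.map_cons, h0]

lemma bRows_spec (sL tL : List String) :
    ∀ (ss : List String) (r0 : Nat), ss = sL.drop r0 →
    bRows tL ss (Lrow sL tL r0) = (List.range' (r0 + 1) ss.length).map (Lrow sL tL) := by
  intro ss
  induction ss with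
  | nil => intro r0 _; simp [bRows]
  | cons sc ss' ih =>
    intro r0 hdrop
    have hr0 : r0 < sL.length := by
      by_contra h
      rw [List.drop_eq_nil_of_le (by omega)] at hdrop
      simp at hdrop
    have hget : sL[r0]? = some sc := by
      have h := congrArg (fun l : List String => l[0]?) hdrop
      simpa using h.symm
    have hsc : sc = sL.getD r0 "" := by
      simp [List.getD_eq_getElem?_getD, hget]
    have hss' : ss' = sL.drop (r0 + 1) := by
      have h := congrArg List.tail hdrop
      simpa [List.tail_drop] using h
    rw [bRows, hsc, bRow_eq_Lrow, ih (r0 + 1) hss']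
    simp [List.range'_succ]

lemma enumerate_map_range' {α : Type} (g : Nat → α) :
    ∀ (n a : Nat), PySem.List.enumerate ((List.range' a n).map g) (a : Int)
      = (List.range' a n).map (fun (k : Nat) => ((k : Int), g k)) := by
  intro n
  induction n with
  | zero => intro a; simp [PySem.List.enumerate_nil]
  | succ n ih =>
    intro a
    rw [List.range'_succ, List.map_cons, List.map_cons, PySem.List.enumerate_cons]
    have : ((a : Int) + 1) = (((a + 1 : Nat)) : Int) := by push_cast; ring
    rw [this, ih (a + 1)]

lemma alt_eq_mtxSpec (target source : List String) :
    get_mtx_alt target source = mtxSpec target source := by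
  unfold get_mtx_alt
  dsimp only
  rw [first_eq_Lrow source target, bRows_spec source target source 0 rfl]
  have hL : Lrow source target 0 :: (List.range' 1 source.length).map (Lrow source target)
      = (List.range (source.length + 1)).map (Lrow source target) := by
    rw [List.range_eq_range', List.range'_succ, List.map_cons]
  rw [hL, List.range_eq_range']
  have h0 : (0 : Int) = ((0 : Nat) : Int) := by norm_num
  rw [h0, enumerate_map_range' (Lrow source target) (source.length + 1) 0, List.map_map]
  simp only [mtxSpec, List.range_eq_range']
  apply List.map_congr_left
  intro r _
  show (PySem.List.enumerate (Lrow source target r) 0).map _ = _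
  rw [Lrow, List.range_eq_range', h0, enumerate_map_range', List.map_map]
  rfl

-- ===== A side =====
def gcell (m : List (List Int)) (r c : Nat) : Int := (m.getD r []).getD c 0
def scell (m : List (List Int)) (r c : Nat) (v : Int) : List (List Int) :=
  m.set r ((m.getD r []).set c v)

lemma pyGet2_natCast (m : List (List Int)) (r c : Nat) :
    pyGet2 m (r : Int) (c : Int) = gcell m r c := by
  simp [pyGet2, gcell]

lemma pySet2_natCast (m : List (List Int)) (r c : Nat) (v : Int) :
    pySet2 m (r : Int) (c : Int) v = scell m r c v := by
  simp [pySet2, scell]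

lemma length_scell (m : List (List Int)) (r c : Nat) (v : Int) :
    (scell m r c v).length = m.length := by
  simp [scell]

lemma rowlen_scell (m : List (List Int)) (r c r' : Nat) (v : Int) :
    ((scell m r c v).getD r' []).length = (m.getD r' []).length := by
  unfold scell
  by_cases h : r' = r
  · subst h
    by_cases hr : r' < m.length
    · simp [List.getD_eq_getElem?_getD, hr]
    · have hle : m.length ≤ r' := by omega
      rw [List.getD_eq_getElem?_getD, List.getD_eq_getElem?_getD,
        List.getElem?_eq_none hle, List.getElem?_eq_none (by simpa using hle)]
  · simp [List.getD_eq_getElem?_getD, List.getElem?_set_ne (by omega : r ≠ r')]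

lemma gcell_scell_same (m : List (List Int)) (r c : Nat) (v : Int)
    (hr : r < m.length) (hc : c < (m.getD r []).length) :
    gcell (scell m r c v) r c = v := by
  unfold gcell scell
  have hc' : c < m[r].length := by
    simpa [List.getD_eq_getElem?_getD, List.getElem?_eq_getElem, hr] using hc
  simp [List.getD_eq_getElem?_getD, hr, hc']

lemma gcell_scell_ne (m : List (List Int)) (r c r' c' : Nat) (v : Int)
    (h : r' ≠ r ∨ c' ≠ c) :
    gcell (scell m r c v) r' c' = gcell m r' c' := by
  unfold gcell scell
  by_cases hr : r' = r
  · subst hr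
    have hc : c' ≠ c := by tauto
    by_cases hlt : r' < m.length
    · simp [List.getD_eq_getElem?_getD, hlt,
        List.getElem?_set_ne (Ne.symm hc)]
    · have hle : m.length ≤ r' := by omega
      simp [List.getD_eq_getElem?_getD, hle, List.length_set]
  · simp [List.getD_eq_getElem?_getD, List.getElem?_set_ne (Ne.symm hr)]

-- fspec recurrences
lemma fspec_zero_right (s t : List String) (c : Nat) : fspec s t 0 c = c := by
  simp [fspec, lspec_zero_left]

lemma fspec_zero_left (s t : List String) (r : Nat) : fspec s t r 0 = r := by
  simp [fspec, lspec_zero_right]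

lemma fspec_succ_eq (s t : List String) (r c : Nat) (h : s.getD r "" = t.getD c "") :
    fspec s t (r + 1) (c + 1) = fspec s t r c := by
  unfold fspec
  rw [lspec, if_pos h]
  push_cast; ring

lemma fspec_succ_ne (s t : List String) (r c : Nat) (h : ¬ s.getD r "" = t.getD c "") :
    fspec s t (r + 1) (c + 1) = min (fspec s t r (c + 1)) (fspec s t (r + 1) c) + 1 := by
  unfold fspec
  rw [lspec, if_neg h]
  rcases Nat.le_total (lspec s t r (c + 1)) (lspec s t (r + 1) c) with hle | hle <;>
    · rw [Nat.max_def]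
      split_ifs <;> push_cast <;> omega

-- the invariant maintained by A's nested loops
def InvA (sL tL : List String) (c0 r0 : Nat) (m : List (List Int)) : Prop :=
  m.length = sL.length + 1 ∧
  (∀ r, r < m.length → (m.getD r []).length = tL.length + 1) ∧
  (∀ c, c ≤ tL.length → gcell m 0 c = c) ∧
  (∀ r, r ≤ sL.length → gcell m r 0 = r) ∧
  (∀ r c, 1 ≤ r → r ≤ sL.length → 1 ≤ c → c ≤ tL.length →
    (c < c0 ∨ (c = c0 ∧ r < r0)) → gcell m r c = fspec sL tL r c)

-- one inner-loop body step preserves the invariant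
lemma innerA_step (sL tL : List String) (c0 r0 : Nat)
    (hc1 : 1 ≤ c0) (hc2 : c0 ≤ tL.length) (hr1 : 1 ≤ r0) (hr2 : r0 ≤ sL.length)
    (m : List (List Int)) (hinv : InvA sL tL c0 r0 m) :
    InvA sL tL c0 (r0 + 1)
      (if PySem.List.pyGetD ("#" :: tL) (c0 : Int) "" ≠ PySem.List.pyGetD ("#" :: sL) (r0 : Int) "" then
        pySet2 m (r0 : Int) (c0 : Int)
          (min (pyGet2 m ((r0 : Int) - 1) (c0 : Int)) (pyGet2 m (r0 : Int) ((c0 : Int) - 1)) + 1)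
      else
        pySet2 m (r0 : Int) (c0 : Int) (pyGet2 m ((r0 : Int) - 1) ((c0 : Int) - 1))) := by
  obtain ⟨hlen, hrow, h0c, hr0c, hmain⟩ := hinv
  have hcastr : (r0 : Int) - 1 = (((r0 - 1 : Nat)) : Int) := by omega
  have hcastc : (c0 : Int) - 1 = (((c0 - 1 : Nat)) : Int) := by omega
  have htchar : PySem.List.pyGetD ("#" :: tL) (c0 : Int) "" = tL.getD (c0 - 1) "" := by
    rw [PySem.List.pyGetD_natCast]
    obtain ⟨k, hk⟩ : ∃ k, c0 = k + 1 := ⟨c0 - 1, by omega⟩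
    simp [hk]
  have hschar : PySem.List.pyGetD ("#" :: sL) (r0 : Int) "" = sL.getD (r0 - 1) "" := by
    rw [PySem.List.pyGetD_natCast]
    obtain ⟨k, hk⟩ : ∃ k, r0 = k + 1 := ⟨r0 - 1, by omega⟩
    simp [hk]
  -- values of the three neighbour cells
  have hup : gcell m (r0 - 1) c0 = fspec sL tL (r0 - 1) c0 := by
    rcases Nat.eq_zero_or_pos (r0 - 1) with h | h
    · rw [h, fspec_zero_right]; exact h0c c0 hc2
    · exact hmain (r0 - 1) c0 h (by omega) hc1 hc2 (Or.inr ⟨rfl, by omega⟩)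
  have hleft : gcell m r0 (c0 - 1) = fspec sL tL r0 (c0 - 1) := by
    rcases Nat.eq_zero_or_pos (c0 - 1) with h | h
    · rw [h, fspec_zero_left]; exact hr0c r0 hr2
    · exact hmain r0 (c0 - 1) hr1 hr2 h (by omega) (Or.inl (by omega))
  have hdiag : gcell m (r0 - 1) (c0 - 1) = fspec sL tL (r0 - 1) (c0 - 1) := by
    rcases Nat.eq_zero_or_pos (r0 - 1) with h | h
    · rw [h, fspec_zero_right]; exact h0c (c0 - 1) (by omega)
    · rcases Nat.eq_zero_or_pos (c0 - 1) with h' | h'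
      · rw [h', fspec_zero_left]; exact hr0c (r0 - 1) (by omega)
      · exact hmain (r0 - 1) (c0 - 1) h (by omega) h' (by omega) (Or.inl (by omega))
  have hbound_r : r0 < m.length := by omega
  have hbound_c : c0 < (m.getD r0 []).length := by rw [hrow r0 hbound_r]; omega
  -- the written value is fspec r0 c0 in both branches
  have key : ∀ v, v = fspec sL tL r0 c0 →
      InvA sL tL c0 (r0 + 1) (scell m r0 c0 v) := by
    intro v hv
    refine ⟨by rw [length_scell]; exact hlen,
      fun r hr => by rw [rowlen_scell]; exact hrow r (by rwa [length_scell] at hr),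
      fun c hc => by rw [gcell_scell_ne m _ _ _ _ _ (Or.inl (by omega))]; exact h0c c hc,
      fun r hr => by rw [gcell_scell_ne m _ _ _ _ _ (Or.inr (by omega))]; exact hr0c r hr,
      fun r c h1 h2 h3 h4 h5 => ?_⟩
    by_cases heq : r = r0 ∧ c = c0
    · obtain ⟨e1, e2⟩ := heq; subst e1; subst e2
      rw [gcell_scell_same m _ _ _ hbound_r hbound_c, hv]
    · have hne : r ≠ r0 ∨ c ≠ c0 := by tauto
      rw [gcell_scell_ne m _ _ _ _ _ hne]
      apply hmain r c h1 h2 h3 h4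
      rcases h5 with h | ⟨e, hlt⟩
      · exact Or.inl h
      · exact Or.inr ⟨e, by
          rcases hne with hne | hne
          · omega
          · exact absurd e hne⟩
  split_ifs with hcond
  · rw [htchar, hschar] at hcond
    rw [hcastr, hcastc, pySet2_natCast, pyGet2_natCast, pyGet2_natCast]
    apply key
    rw [hup, hleft]
    have : fspec sL tL ((r0 - 1) + 1) ((c0 - 1) + 1)
        = min (fspec sL tL (r0 - 1) ((c0 - 1) + 1)) (fspec sL tL ((r0 - 1) + 1) (c0 - 1)) + 1 :=
      fspec_succ_ne sL tL (r0 - 1) (c0 - 1) (fun h => hcond (h.symm))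
    rw [show (r0 - 1) + 1 = r0 by omega, show (c0 - 1) + 1 = c0 by omega] at this
    exact this.symm
  · rw [htchar, hschar] at hcond
    push_neg at hcond
    rw [hcastr, hcastc, pySet2_natCast, pyGet2_natCast]
    apply key
    rw [hdiag]
    have : fspec sL tL ((r0 - 1) + 1) ((c0 - 1) + 1) = fspec sL tL (r0 - 1) (c0 - 1) :=
      fspec_succ_eq sL tL (r0 - 1) (c0 - 1) hcond.symm
    rw [show (r0 - 1) + 1 = r0 by omega, show (c0 - 1) + 1 = c0 by omega] at this
    exact this.symm

-- the whole inner loop (rows r0 .. sL.length) preserves/extends the invariant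
lemma innerA_loop (sL tL : List String) (c0 : Nat) (hc1 : 1 ≤ c0) (hc2 : c0 ≤ tL.length) :
    ∀ (k r0 : Nat) (m : List (List Int)), 1 ≤ r0 → r0 + k = sL.length + 1 →
    InvA sL tL c0 r0 m →
    InvA sL tL c0 (sL.length + 1)
      ((PySem.List.pyRange (r0 : Int) ((sL.length + 1 : Nat) : Int) 1).foldl
        (fun m r =>
          if PySem.List.pyGetD ("#" :: tL) (c0 : Int) "" ≠ PySem.List.pyGetD ("#" :: sL) r "" then
            pySet2 m r (c0 : Int) (min (pyGet2 m (r - 1) (c0 : Int)) (pyGet2 m r ((c0 : Int) - 1)) + 1)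
          else
            pySet2 m r (c0 : Int) (pyGet2 m (r - 1) ((c0 : Int) - 1))) m) := by
  intro k
  induction k with
  | zero =>
    intro r0 m h1 h2 hinv
    rw [PySem.List.pyRange_one_eq_nil (by omega : ((sL.length + 1 : Nat) : Int) ≤ (r0 : Int))]
    simpa [show r0 = sL.length + 1 by omega] using hinv
  | succ k ih =>
    intro r0 m h1 h2 hinv
    rw [PySem.List.pyRange_one_cons (by omega : (r0 : Int) < ((sL.length + 1 : Nat) : Int))]
    rw [List.foldl_cons]
    have hstep := innerA_step sL tL c0 r0 hc1 hc2 h1 (by omega) m hinv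
    have : ((r0 : Int) + 1) = (((r0 + 1 : Nat)) : Int) := by push_cast; ring
    rw [this]
    exact ih (r0 + 1) _ (by omega) (by omega) hstep

-- the outer loop
lemma outerA_loop (sL tL : List String) :
    ∀ (k c0 : Nat) (m : List (List Int)), 1 ≤ c0 → c0 + k = tL.length + 1 →
    InvA sL tL c0 1 m →
    InvA sL tL (tL.length + 1) 1
      ((PySem.List.pyRange (c0 : Int) ((tL.length + 1 : Nat) : Int) 1).foldl
        (fun m c =>
          (PySem.List.pyRange 1 ((sL.length + 1 : Nat) : Int) 1).foldl
            (fun m r =>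
              if PySem.List.pyGetD ("#" :: tL) c "" ≠ PySem.List.pyGetD ("#" :: sL) r "" then
                pySet2 m r c (min (pyGet2 m (r - 1) c) (pyGet2 m r (c - 1)) + 1)
              else
                pySet2 m r c (pyGet2 m (r - 1) (c - 1))) m) m) := by
  intro k
  induction k with
  | zero =>
    intro c0 m h1 h2 hinv
    rw [PySem.List.pyRange_one_eq_nil (by omega : ((tL.length + 1 : Nat) : Int) ≤ (c0 : Int))]
    have hc0 : c0 = tL.length + 1 := by omega
    subst hc0
    simpa using hinv
  | succ k ih =>
    intro c0 m h1 h2 hinv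
    rw [PySem.List.pyRange_one_cons (by omega : (c0 : Int) < ((tL.length + 1 : Nat) : Int))]
    rw [List.foldl_cons]
    have h1c : (1 : Int) = ((1 : Nat) : Int) := by norm_num
    have hin := innerA_loop sL tL c0 h1 (by omega) sL.length 1 m (le_refl 1) (by omega)
      hinv
    rw [h1c] at hin
    have hnext : InvA sL tL (c0 + 1) 1
        ((PySem.List.pyRange ((1 : Nat) : Int) ((sL.length + 1 : Nat) : Int) 1).foldl
          (fun m r =>
            if PySem.List.pyGetD ("#" :: tL) (c0 : Int) "" ≠ PySem.List.pyGetD ("#" :: sL) r "" then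
              pySet2 m r (c0 : Int) (min (pyGet2 m (r - 1) (c0 : Int)) (pyGet2 m r ((c0 : Int) - 1)) + 1)
            else
              pySet2 m r (c0 : Int) (pyGet2 m (r - 1) ((c0 : Int) - 1))) m) := by
      obtain ⟨a1, a2, a3, a4, a5⟩ := hin
      exact ⟨a1, a2, a3, a4, fun r c hr1 hr2 hc1 hc2 h5 => a5 r c hr1 hr2 hc1 hc2 (by omega)⟩
    have hcast : ((c0 : Int) + 1) = (((c0 + 1 : Nat)) : Int) := by push_cast; ring
    rw [hcast]
    exact ih (c0 + 1) _ (by omega) (by omega) (by rw [h1c]; exact hnext)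

-- writing to an out-of-range cell does not change the cell read back
lemma gcell_scell_oob (m : List (List Int)) (r c : Nat) (v : Int)
    (h : ¬ (r < m.length ∧ c < (m.getD r []).length)) :
    gcell (scell m r c v) r c = gcell m r c := by
  unfold gcell scell
  by_cases hlt : r < m.length
  · have hc : (m.getD r []).length ≤ c := by omega
    rw [List.set_eq_of_length_le hc]
    simp [List.getD_eq_getElem?_getD, hlt]
  · rw [List.set_eq_of_length_le (by omega)]

-- the first-column loop: what it writes and what it leaves alone
lemma colA_loop :
    ∀ (k j0 : Nat) (m : List (List Int)),
    ((PySem.List.pyRange (j0 : Int) ((j0 + k : Nat) : Int) 1).foldl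
        (fun m j => pySet2 m j 0 j) m).length = m.length ∧
    (∀ r', (((PySem.List.pyRange (j0 : Int) ((j0 + k : Nat) : Int) 1).foldl
        (fun m j => pySet2 m j 0 j) m).getD r' []).length = (m.getD r' []).length) ∧
    (∀ r c : Nat, gcell ((PySem.List.pyRange (j0 : Int) ((j0 + k : Nat) : Int) 1).foldl
        (fun m j => pySet2 m j 0 j) m) r c
      = if c = 0 ∧ j0 ≤ r ∧ r < j0 + k ∧ r < m.length ∧ 0 < (m.getD r []).length
        then (r : Int) else gcell m r c) := by
  intro k
  induction k with
  | zero =>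
    intro j0 m
    rw [PySem.List.pyRange_one_eq_nil (by omega : ((j0 + 0 : Nat) : Int) ≤ (j0 : Int))]
    refine ⟨rfl, fun _ => rfl, fun r c => ?_⟩
    rw [if_neg (by omega)]
    rfl
  | succ k ih =>
    intro j0 m
    rw [PySem.List.pyRange_one_cons (by omega : (j0 : Int) < ((j0 + (k + 1) : Nat) : Int))]
    rw [List.foldl_cons]
    have h0 : (0 : Int) = ((0 : Nat) : Int) := rfl
    have hset : pySet2 m (j0 : Int) 0 (j0 : Int) = scell m j0 0 (j0 : Int) := by
      rw [h0, pySet2_natCast]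
    have hcast : ((j0 : Int) + 1) = (((j0 + 1 : Nat)) : Int) := by push_cast; ring
    have hrange : ((j0 + (k + 1) : Nat) : Int) = (((j0 + 1) + k : Nat) : Int) := by push_cast; ring
    rw [hset, hcast, hrange]
    obtain ⟨ih1, ih2, ih3⟩ := ih (j0 + 1) (scell m j0 0 (j0 : Int))
    refine ⟨by rw [ih1, length_scell], fun r' => by rw [ih2 r', rowlen_scell],
      fun r c => ?_⟩
    rw [ih3 r c]
    by_cases hnew : c = 0 ∧ j0 + 1 ≤ r ∧ r < (j0 + 1) + k ∧ r < (scell m j0 0 (j0:Int)).length ∧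
        0 < ((scell m j0 0 (j0:Int)).getD r []).length
    · rw [if_pos hnew, if_pos (by
        obtain ⟨e1, e2, e3, e4, e5⟩ := hnew
        rw [length_scell] at e4
        rw [rowlen_scell] at e5
        exact ⟨e1, by omega, by omega, e4, e5⟩)]
    · rw [if_neg hnew]
      by_cases hme : r = j0 ∧ c = 0 ∧ r < m.length ∧ 0 < (m.getD r []).length
      · obtain ⟨e1, e2, e3, e4⟩ := hme
        subst e1; subst e2
        rw [gcell_scell_same m _ _ _ e3 e4, if_pos ⟨rfl, by omega, by omega, e3, e4⟩]
      · have hnot : ¬ (c = 0 ∧ j0 ≤ r ∧ r < j0 + (k + 1) ∧ r < m.length ∧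
            0 < (m.getD r []).length) := by
          intro ⟨e1, e2, e3, e4, e5⟩
          rw [length_scell] at hnew
          rw [rowlen_scell] at hnew
          have hrj : r ≠ j0 := by
            intro he
            exact hme ⟨he, e1, e4, e5⟩
          exact hnew ⟨e1, by omega, by omega, e4, e5⟩
        rw [if_neg hnot]
        by_cases hrj : r = j0
        · subst hrj
          by_cases hc : c = 0
          · subst hc
            exact gcell_scell_oob m _ _ _ (by tauto)
          · exact gcell_scell_ne m _ _ _ _ _ (Or.inr hc)
        · exact gcell_scell_ne m _ _ _ _ _ (Or.inl hrj)

-- reading the finished matrix off the invariant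
lemma extractA (sL tL : List String) (m : List (List Int))
    (hinv : InvA sL tL (tL.length + 1) 1 m) : m = mtxSpec tL sL := by
  obtain ⟨h1, h2, h3, h4, h5⟩ := hinv
  apply List.ext_getElem (by simp [mtxSpec, h1])
  intro r hr hr'
  have hrn : r < sL.length + 1 := by omega
  have hrow : m.getD r [] = m[r] := by
    simp [List.getD_eq_getElem?_getD, hr]
  have hrowlen : m[r].length = tL.length + 1 := by
    rw [← hrow]; exact h2 r hr
  simp only [mtxSpec]
  rw [List.getElem_map, List.getElem_range]
  apply List.ext_getElem (by simp [hrowlen])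
  intro c hc hc'
  have hcn : c < tL.length + 1 := by omega
  rw [List.getElem_map, List.getElem_range]
  have hgc : gcell m r c = m[r][c] := by
    rw [gcell, hrow]
    simp [List.getD_eq_getElem?_getD, hc]
  rw [← hgc]
  rcases Nat.eq_zero_or_pos r with hr0 | hr0
  · subst hr0
    rw [h3 c (by omega), fspec_zero_right]
  · rcases Nat.eq_zero_or_pos c with hc0 | hc0
    · subst hc0
      rw [h4 r (by omega), fspec_zero_left]
    · exact h5 r c hr0 (by omega) hc0 (by omega) (Or.inl (by omega))

lemma A_eq_mtxSpec (target source : List String) :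
    get_mtx target source = mtxSpec target source := by
  unfold get_mtx
  dsimp only
  have hlt : ("#" :: target).length = target.length + 1 := by simp
  have hls : ("#" :: source).length = source.length + 1 := by simp
  rw [hlt, hls]
  apply extractA
  -- the matrix after the three initialisation steps
  have hm1 : PySem.List.pySetD
      ((List.range (source.length + 1)).map
        (fun _ => (List.range (target.length + 1)).map (fun _ => (0 : Int)))) 0
      (PySem.List.pyRange 0 ((target.length + 1 : Nat) : Int) 1)
      = ((List.range (source.length + 1)).map
          (fun _ => (List.range (target.length + 1)).map (fun _ => (0 : Int)))).set 0
          (PySem.List.pyRange 0 ((target.length + 1 : Nat) : Int) 1) := by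
    rw [show (0 : Int) = ((0 : Nat) : Int) from rfl, PySem.List.pySetD_natCast]
  rw [hm1]
  set m1 := ((List.range (source.length + 1)).map
      (fun _ => (List.range (target.length + 1)).map (fun _ => (0 : Int)))).set 0
      (PySem.List.pyRange 0 ((target.length + 1 : Nat) : Int) 1) with hm1def
  have hm1len : m1.length = source.length + 1 := by simp [hm1def]
  have hm1row : ∀ r, r < source.length + 1 → (m1.getD r []).length = target.length + 1 := by
    intro r hr
    rcases Nat.eq_zero_or_pos r with h | h
    · subst h
      simp [hm1def, List.getD_eq_getElem?_getD,
        PySem.List.length_pyRange_one, hr]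
    · simp [hm1def, List.getD_eq_getElem?_getD, hr]
      simp [(show ¬ ((0:Nat) = r) by omega)]
  have hm1row0 : ∀ c, c < target.length + 1 →
      gcell m1 0 c = (c : Int) := by
    intro c hc
    unfold gcell
    simp [hm1def, List.getD_eq_getElem?_getD,
      List.length_range, PySem.List.getElem?_pyRange_one]
    rw [if_pos (by omega : c ≤ target.length)]
    rfl
  -- the column loop
  have hcol := colA_loop (source.length + 1) 0 m1
  simp only [Nat.cast_zero, Nat.zero_add, Nat.zero_le, true_and] at hcol
  obtain ⟨hc1, hc2, hc3⟩ := hcol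
  set m2 := (PySem.List.pyRange 0 ((source.length + 1 : Nat) : Int) 1).foldl
      (fun m j => pySet2 m j 0 j) m1 with hm2def
  have inv2 : InvA source target 1 1 m2 := by
    refine ⟨by rw [hc1, hm1len], fun r hr => by rw [hc2 r, hm1row r (by rwa [hc1, hm1len] at hr)],
      fun c hcle => ?_, fun r hrle => ?_, fun r c h1 h2 h3 h4 h5 => by omega⟩
    · rcases Nat.eq_zero_or_pos c with h | h
      · subst h
        rw [hc3 0 0, if_pos ⟨rfl, by omega, by omega, by rw [hm1row 0 (by omega)]; omega⟩]
      · rw [hc3 0 c, if_neg (by omega)]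
        exact hm1row0 c (by omega)
    · rw [hc3 r 0, if_pos ⟨rfl, by omega, by omega, by rw [hm1row r (by omega)]; omega⟩]
  -- the anchor write touches only cell (1,1), about which the invariant says nothing yet
  have inv3 : InvA source target 1 1
      (if PySem.List.pyGetD ("#" :: target) 1 "" ≠ PySem.List.pyGetD ("#" :: source) 1 "" then
        pySet2 m2 1 1 2 else m2) := by
    split_ifs with h
    · have hset : pySet2 m2 1 1 2 = scell m2 1 1 2 := by
        rw [show (1 : Int) = ((1 : Nat) : Int) from rfl, pySet2_natCast]
      rw [hset]
      obtain ⟨a1, a2, a3, a4, a5⟩ := inv2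
      exact ⟨by rw [length_scell]; exact a1,
        fun r hr => by rw [rowlen_scell]; exact a2 r (by rwa [length_scell] at hr),
        fun c hcle => by rw [gcell_scell_ne m2 _ _ _ _ _ (Or.inl (by omega))]; exact a3 c hcle,
        fun r hrle => by rw [gcell_scell_ne m2 _ _ _ _ _ (Or.inr (by omega))]; exact a4 r hrle,
        fun r c h1 h2 h3 h4 h5 => by omega⟩
    · exact inv2
  -- the nested loops
  have hout := outerA_loop source target target.length 1 _ (le_refl 1) (by omega) inv3
  simpa only [Nat.cast_one] using hout

lemma get_mtx_eq_alt (target source : List String) :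
    get_mtx target source = get_mtx_alt target source := by
  rw [A_eq_mtxSpec, alt_eq_mtxSpec]


-- ===== VERDICT (by name: the statement is the Claim_ definition above) =====
theorem get_mtx_spec : Claim_equal_get_mtx := by
  intro target source _ _
  unfold Spec_get_mtx
  exact get_mtx_eq_alt target source
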